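-- pv_equiv track=rewrite | github.com/abhijitsharma/blog | word_puzzle/code/word_puzzle.py | repeated_ngram
-- ===== SOURCE A (Python) =====
-- def repeated_ngram(ngrams: list, num_reps=2):
--     result = []
--     for i in range(len(ngrams)):
--         r = []
--         j = i + 1
--         for k in range(j, len(ngrams)):
--             if ngrams[i] == ngrams[k] and len(r) < num_reps:
--                 if len(r) == 0:
--                     r.append(ngrams[i])
--                 r.append(ngrams[k])
--         if len(r) == num_reps:
--             result.append(r)
--     return result
-- ===== SOURCE B (Python) =====
-- def repeated_ngram(ngrams: list, num_reps=2):
--     # One right-to-left pass: for each position, 'later[v]' is the number of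
--     # occurrences of v strictly after it; a position contributes iff that
--     # count reaches num_reps - 1 (so the value occurs num_reps times in total
--     # from this position on), and the contribution is the value repeated
--     # num_reps times.
--     later = {}
--     result = []
--     for v in reversed(ngrams):
--         c = later.get(v, 0)
--         if num_reps >= 2 and c >= num_reps - 1:
--             result.append([v] * num_reps)
--         later[v] = c + 1
--     result.reverse()
--     return result
-- ===== Notes on version B (the rewrite author's own statement) =====
-- stated objective: faster
-- what changed: Replaced the quadratic nested index scan with a single right-to-left pass that keeps a dict of remaining occurrence counts, emitting the value repeated num_reps times whenever a position has at least num_reps-1 later duplicates.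
-- intended difference: For num_reps == 0 with a non-empty list A returns one empty sublist per element (its empty accumulator trivially passes the len(r)==num_reps check), while B returns an empty result list - no element is a repetition zero times, so B's is the intended value. — e.g. on repeated_ngram(["x"], 0): A returns [[]], B returns []
import Mathlib
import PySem

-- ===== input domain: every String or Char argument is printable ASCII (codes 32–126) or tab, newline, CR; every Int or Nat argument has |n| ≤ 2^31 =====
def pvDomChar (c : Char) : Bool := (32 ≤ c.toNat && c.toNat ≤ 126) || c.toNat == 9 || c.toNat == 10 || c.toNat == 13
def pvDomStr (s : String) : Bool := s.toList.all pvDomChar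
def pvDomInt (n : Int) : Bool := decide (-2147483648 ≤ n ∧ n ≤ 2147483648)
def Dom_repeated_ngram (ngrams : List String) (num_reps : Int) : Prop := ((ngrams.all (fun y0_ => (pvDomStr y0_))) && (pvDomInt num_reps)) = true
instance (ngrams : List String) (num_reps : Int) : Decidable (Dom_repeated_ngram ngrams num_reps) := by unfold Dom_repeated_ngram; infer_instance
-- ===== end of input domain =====

-- B replaces A's quadratic nested index scan by one right-to-left pass with a dict of
-- suffix occurrence counts (asymptotically faster); A=B proved outside D_ (num_reps = 0 on
-- a non-empty list, where A's empty accumulator accidentally passes the length check).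


-- ===== PORT A =====
def repeated_ngram (ngrams : List String) (num_reps : Int) : List (List String) :=
  (PySem.List.pyRange 0 (ngrams.length : Int) 1).foldl (fun result i =>
    let r : List String :=
      let j := i + 1
      (PySem.List.pyRange j (ngrams.length : Int) 1).foldl (fun r k =>
        if PySem.List.pyGetD ngrams i "" = PySem.List.pyGetD ngrams k ""
            ∧ (r.length : Int) < num_reps then
          (if r.length = 0 then r ++ [PySem.List.pyGetD ngrams i ""] else r)
            ++ [PySem.List.pyGetD ngrams k ""]
        else r) ([] : List String)
    if (r.length : Int) = num_reps then result ++ [r] else result) []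

-- ===== PORT B =====
def repeated_ngram_alt (ngrams : List String) (num_reps : Int) : List (List String) :=
  let st := ngrams.reverse.foldl
    (fun (st : PySem.Dict String Int × List (List String)) v =>
      let c := st.1.getD v 0
      let result := if num_reps ≥ 2 ∧ c ≥ num_reps - 1 then
          st.2 ++ [List.replicate num_reps.toNat v] else st.2
      (st.1.insert v (c + 1), result))
    (PySem.Dict.empty, ([] : List (List String)))
  st.2.reverse

-- ===== PRECONDITION & SPEC =====
-- For num_reps == 0 with a non-empty list A returns one empty sublist per element (its empty
-- accumulator trivially passes the length check), while B returns an empty result list;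
-- no element is a repetition zero times, so B's is the intended value.
def D_repeated_ngram (ngrams : List String) (num_reps : Int) : Prop :=
  num_reps = 0 ∧ ngrams ≠ []
instance (ngrams : List String) (num_reps : Int) : Decidable (D_repeated_ngram ngrams num_reps) := by
  unfold D_repeated_ngram; infer_instance

def Spec_repeated_ngram (ngrams : List String) (num_reps : Int) (out : List (List String)) : Prop :=
  ¬ D_repeated_ngram ngrams num_reps → out = repeated_ngram_alt ngrams num_reps
instance (ngrams : List String) (num_reps : Int) (out : List (List String)) : Decidable (Spec_repeated_ngram ngrams num_reps out) := by
  unfold Spec_repeated_ngram; infer_instance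

def pvDiffWitness_repeated_ngram : List String × Int := (["x"], 0)
def pvDiffWitnessOut_repeated_ngram : (List (List String)) × (List (List String)) := ([[]], [])

-- ===== CLAIM (what is proved, stated in full; the proofs are below) =====
def Claim_unchanged_repeated_ngram : Prop := ∀ (ngrams : List String) (num_reps : Int), Dom_repeated_ngram ngrams num_reps → Spec_repeated_ngram ngrams num_reps (repeated_ngram ngrams num_reps)
def Claim_changed_repeated_ngram : Prop := Dom_repeated_ngram (pvDiffWitness_repeated_ngram.1) (pvDiffWitness_repeated_ngram.2) ∧ D_repeated_ngram (pvDiffWitness_repeated_ngram.1) (pvDiffWitness_repeated_ngram.2) ∧ repeated_ngram (pvDiffWitness_repeated_ngram.1) (pvDiffWitness_repeated_ngram.2) = pvDiffWitnessOut_repeated_ngram.1 ∧ repeated_ngram_alt (pvDiffWitness_repeated_ngram.1) (pvDiffWitness_repeated_ngram.2) = pvDiffWitnessOut_repeated_ngram.2 ∧ pvDiffWitnessOut_repeated_ngram.1 ≠ pvDiffWitnessOut_repeated_ngram.2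
def Claim_exact_repeated_ngram : Prop := ∀ (ngrams : List String) (num_reps : Int), Dom_repeated_ngram ngrams num_reps → D_repeated_ngram ngrams num_reps → repeated_ngram ngrams num_reps ≠ repeated_ngram_alt ngrams num_reps

-- ===== LEMMAS AND PROOFS =====

-- the common specification: position i contributes [v]*num_reps iff v occurs ≥ num_reps-1 more times later
def specList (nr : Int) : List String → List (List String)
  | [] => []
  | x :: xs =>
    (if 2 ≤ nr ∧ nr - 1 ≤ (xs.count x : Int) then [List.replicate nr.toNat x] else []) ++ specList nr xs

-- the dict B's loop builds after consuming (the reverse of) xs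
def cdict : List String → PySem.Dict String Int
  | [] => PySem.Dict.empty
  | x :: xs => (cdict xs).insert x ((cdict xs).getD x 0 + 1)

lemma cdict_getD (xs : List String) (v : String) : (cdict xs).getD v 0 = (xs.count v : Int) := by
  induction xs with
  | nil => simp [cdict]
  | cons x xs ih =>
    by_cases h : v = x
    · subst h
      simp [cdict, PySem.Dict.getD_insert_self, ih]
    · simp [cdict, PySem.Dict.getD_insert, h, ih, Ne.symm h]

lemma alt_loop (nr : Int) (xs : List String) :
    xs.reverse.foldl
      (fun (st : PySem.Dict String Int × List (List String)) v =>
        let c := st.1.getD v 0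
        let result := if nr ≥ 2 ∧ c ≥ nr - 1 then
            st.2 ++ [List.replicate nr.toNat v] else st.2
        (st.1.insert v (c + 1), result))
      (PySem.Dict.empty, ([] : List (List String)))
    = (cdict xs, (specList nr xs).reverse) := by
  induction xs with
  | nil => simp [cdict, specList]
  | cons x xs ih =>
    simp only [List.reverse_cons, List.foldl_append, ih, List.foldl_cons, List.foldl_nil]
    simp only [cdict, cdict_getD, specList]
    by_cases h : 2 ≤ nr ∧ nr - 1 ≤ (xs.count x : Int)
    · simp [h, ge_iff_le]
    · rw [if_neg (by tauto), if_neg (by simpa [ge_iff_le, and_comm] using h)]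
      simp

lemma alt_eq_spec (nr : Int) (xs : List String) :
    repeated_ngram_alt xs nr = specList nr xs := by
  unfold repeated_ngram_alt
  simp only [alt_loop nr xs, List.reverse_reverse]

-- A's inner loop, as a fold over the suffix list
def innerStep (nr : Int) (v : String) : List String → String → List String :=
  fun r y =>
    if v = y ∧ (r.length : Int) < nr then
      (if r.length = 0 then r ++ [v] else r) ++ [y]
    else r

lemma inner_rep (nr : Int) (v : String) (t : List String) :
    ∀ m : Nat, 1 ≤ m →
      t.foldl (innerStep nr v) (List.replicate m v)
        = List.replicate (min (m + t.count v) (max m nr.toNat)) v := by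
  induction t with
  | nil => intro m hm; simp
  | cons y t ih =>
    intro m hm
    by_cases hy : v = y
    · subst hy
      by_cases hc : (m : Int) < nr
      · have : innerStep nr v (List.replicate m v) v = List.replicate (m + 1) v := by
          have hne : m ≠ 0 := by omega
          simp [innerStep, hc, hne, List.replicate_succ' (n := m)]
        simp only [List.foldl_cons, this, ih (m + 1) (by omega)]
        have h1 : m < nr.toNat := by omega
        congr 1
        simp
        omega
      · have : innerStep nr v (List.replicate m v) v = List.replicate m v := by
          simp [innerStep, hc]
        simp only [List.foldl_cons, this, ih m hm]
        congr 1
        simp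
        omega
    · have : innerStep nr v (List.replicate m v) y = List.replicate m v := by
        simp [innerStep, hy]
      simp only [List.foldl_cons, this, ih m hm]
      congr 1
      simp [Ne.symm hy]
  
lemma inner_nil (nr : Int) (v : String) (t : List String) :
    t.foldl (innerStep nr v) []
      = if 0 < nr ∧ 0 < t.count v then
          List.replicate (min (1 + t.count v) (max 2 nr.toNat)) v
        else [] := by
  induction t with
  | nil => simp
  | cons y t ih =>
    by_cases hy : v = y
    · subst hy
      by_cases hc : 0 < nr
      · have : innerStep nr v [] v = List.replicate 2 v := by
          simp [innerStep, hc]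
        simp only [List.foldl_cons, this, inner_rep nr v t 2 (by omega)]
        rw [if_pos ⟨hc, by simp⟩]
        congr 1
        simp
        omega
      · have : innerStep nr v [] v = [] := by
          simp [innerStep]; omega
        simp only [List.foldl_cons, this, ih]
        rw [if_neg (by tauto), if_neg (by tauto)]
    · have : innerStep nr v [] y = [] := by
        simp [innerStep, hy]
      simp only [List.foldl_cons, this, ih, List.count_cons]
      simp [Ne.symm hy]
  
-- closed form for A's inner loop result at index i (as a Nat index), via the suffix count
def innerRes (nr : Int) (xs : List String) (i : Nat) : List String :=
  if 0 < nr ∧ 0 < (xs.drop (i + 1)).count (xs.getD i "") then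
    List.replicate (min (1 + (xs.drop (i + 1)).count (xs.getD i "")) (max 2 nr.toNat)) (xs.getD i "")
  else []

-- the Nat-range form of A
lemma A_eq_range (xs : List String) (nr : Int) :
    repeated_ngram xs nr
      = ((List.range xs.length).filter
          (fun i => decide (((innerRes nr xs i).length : Int) = nr))).map (innerRes nr xs) := by
  unfold repeated_ngram
  rw [PySem.List.foldl_congr_mem
    (g := fun (result : List (List String)) (i : Int) =>
      if ((innerRes nr xs i.toNat).length : Int) = nr then result ++ [innerRes nr xs i.toNat] else result)]
  · rw [PySem.List.foldl_append_ite
      (p := fun i : Int => ((innerRes nr xs i.toNat).length : Int) = nr)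
      (f := fun i : Int => innerRes nr xs i.toNat)]
    rw [PySem.List.pyRange_zero_nat]
    simp only [List.filter_map, List.map_map]
    congr 1
  · intro acc i hi
    have hi' : 0 ≤ i ∧ i < (xs.length : Int) := by
      simpa [PySem.List.mem_pyRange_one] using hi
    have h1 : PySem.List.pyGetD xs i "" = xs.getD i.toNat "" :=
      PySem.List.pyGetD_of_nonneg xs "" hi'.1
    have hfold :
        (PySem.List.pyRange (i + 1) (xs.length : Int) 1).foldl
          (fun r k =>
            if PySem.List.pyGetD xs i "" = PySem.List.pyGetD xs k ""
                ∧ (r.length : Int) < nr then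
              (if r.length = 0 then r ++ [PySem.List.pyGetD xs i ""] else r)
                ++ [PySem.List.pyGetD xs k ""]
            else r) ([] : List String)
        = (xs.drop (i + 1).toNat).foldl (innerStep nr (xs.getD i.toNat "")) [] := by
      rw [h1]
      exact PySem.List.foldl_pyRange_pyGetD' xs "" (innerStep nr (xs.getD i.toNat "")) [] (by omega)
    simp only [hfold, inner_nil, innerRes]
    have h2 : (i + 1).toNat = i.toNat + 1 := by omega
    rw [h2]
  
lemma range_shift {α : Type} (n : Nat) (P : Nat → Bool) (Q : Nat → α) :
    (((List.range n).map Nat.succ).filter P).map Q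
      = ((List.range n).filter (fun i => P (i + 1))).map (fun i => Q (i + 1)) := by
  rw [List.filter_map, List.map_map]
  rfl

lemma spec_eq_range (xs : List String) (nr : Int) :
    specList nr xs
      = ((List.range xs.length).filter
          (fun i => decide (2 ≤ nr ∧ nr - 1 ≤ ((xs.drop (i + 1)).count (xs.getD i "") : Int)))).map
          (fun i => List.replicate nr.toNat (xs.getD i "")) := by
  induction xs with
  | nil => simp [specList]
  | cons x xs ih =>
    show (if 2 ≤ nr ∧ nr - 1 ≤ (xs.count x : Int) then [List.replicate nr.toNat x] else [])
        ++ specList nr xs = _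
    rw [List.length_cons, List.range_succ_eq_map, List.filter_cons]
    have hsh := range_shift xs.length
      (fun i => decide (2 ≤ nr ∧ nr - 1 ≤ ((((x :: xs).drop (i + 1)).count ((x :: xs).getD i "")) : Int)))
      (fun i => List.replicate nr.toNat ((x :: xs).getD i ""))
    split_ifs with h hc hc
    · rw [List.map_cons, hsh]
      simp only [List.drop_succ_cons, List.getD_cons_succ, List.getD_cons_zero]
      rw [← ih]
      rfl
    · exfalso
      simp only [decide_eq_true_eq, List.drop_succ_cons, List.drop_zero, List.getD_cons_zero] at hc
      exact hc h
    · exfalso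
      simp only [decide_eq_true_eq, List.drop_succ_cons, List.drop_zero, List.getD_cons_zero] at hc
      exact h hc
    · rw [hsh]
      simp only [List.drop_succ_cons, List.getD_cons_succ]
      rw [← ih]
      rfl

lemma A_eq_spec (xs : List String) (nr : Int) (hnr : nr ≠ 0) :
    repeated_ngram xs nr = specList nr xs := by
  rw [A_eq_range, spec_eq_range]
  have hcond : ∀ i, i ∈ List.range xs.length →
      (decide (((innerRes nr xs i).length : Int) = nr))
        = decide (2 ≤ nr ∧ nr - 1 ≤ ((xs.drop (i + 1)).count (xs.getD i "") : Int)) := by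
    intro i _
    unfold innerRes
    by_cases h : 0 < nr ∧ 0 < (xs.drop (i + 1)).count (xs.getD i "")
    · rw [if_pos h]
      simp only [List.length_replicate, decide_eq_decide]
      omega
    · rw [if_neg h]
      simp only [List.length_nil, decide_eq_decide]
      constructor
      · intro h0
        omega
      · intro ⟨h1, h2⟩
        exact absurd ⟨by omega, by omega⟩ h
  rw [List.filter_congr hcond]
  apply List.map_congr_left
  intro i hi
  simp only [List.mem_filter, decide_eq_true_eq] at hi
  unfold innerRes
  rw [if_pos ⟨by omega, by omega⟩]
  congr 1
  omega

lemma spec_zero (xs : List String) : specList 0 xs = [] := by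
  induction xs with
  | nil => rfl
  | cons x xs ih => simp [specList, ih]

lemma A_zero_length (xs : List String) : (repeated_ngram xs 0).length = xs.length := by
  rw [A_eq_range]
  have : ∀ i ∈ List.range xs.length,
      (decide (((innerRes 0 xs i).length : Int) = 0)) = true := by
    intro i _
    unfold innerRes
    simp
  rw [List.filter_congr this]
  simp

-- ===== VERDICT (by name: the statement is the Claim_ definition above) =====
theorem repeated_ngram_spec : Claim_unchanged_repeated_ngram := by
  intro ngrams num_reps _ hD
  rw [alt_eq_spec]
  by_cases h : num_reps = 0
  · subst h
    have hnil : ngrams = [] := by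
      by_contra hne
      exact hD ⟨rfl, hne⟩
    subst hnil
    rfl
  · exact A_eq_spec ngrams num_reps h

theorem repeated_ngram_changed : Claim_changed_repeated_ngram := by
  unfold Claim_changed_repeated_ngram; decide

theorem repeated_ngram_tight : Claim_exact_repeated_ngram := by
  intro ngrams num_reps _ hD
  obtain ⟨h0, hne⟩ := hD
  subst h0
  intro heq
  have hl := congrArg List.length heq
  rw [A_zero_length, alt_eq_spec, spec_zero] at hl
  simp at hl
  exact hne hl
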